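-- pv_equiv track=rewrite | github.com/joezuntz/great3-public | presubmission_script/branch_id.py | formatted_branch_name
-- ===== SOURCE A (Python) =====
-- experiments = ['control', 'real_galaxy', 'variable_psf', 'multiepoch', 'full']
--
-- observation_types = ['ground', 'space']
--
-- shear_types = ['constant', 'variable']
--
-- branch_names = []
--
-- def formatted_branch_name(branch):
--     """
--     Takes a branch name which may be delineated by eg '/' (if it's a subdirectory structure),
--     and turns it into a hyphen-delinated version of the same string.
--     """
--     for exp in experiments:
--         if exp in branch:
--             for otype in observation_types:
--                 if otype in branch:
--                     for stype in shear_types: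
--                         if stype in branch:
--                             return exp+'-'+otype+'-'+stype
--     raise RuntimeError('Branch %s does not appear to be a valid branch name--please pass one of '
--                          '[%s] with the command-line option -b.'%(branch, ', '.join(branch_names)))
-- ===== SOURCE B (Python) =====
-- experiments = ['control', 'real_galaxy', 'variable_psf', 'multiepoch', 'full']
--
-- observation_types = ['ground', 'space']
--
-- shear_types = ['constant', 'variable']
--
-- branch_names = []
--
-- def formatted_branch_name(branch):
--     """
--     Takes a branch name which may be delineated by eg '/' (if it's a subdirectory structure),
--     and turns it into a hyphen-delinated version of the same string.
--     """
--     parts = []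
--     for options in (experiments, observation_types, shear_types):
--         match = next((o for o in options if o in branch), None)
--         if match is None:
--             raise RuntimeError('Branch %s does not appear to be a valid branch name--please pass one of '
--                                '[%s] with the command-line option -b.'%(branch, ', '.join(branch_names)))
--         parts.append(match)
--     return '-'.join(parts)
-- ===== Notes on version B (the rewrite author's own statement) =====
-- stated objective: simpler
-- what changed: Replaced A's nested triple loop over experiments/observation_types/shear_types by one flat loop over the three option lists that collects the first matching entry of each and joins them with hyphens; valid because each membership test is independent of the enclosing loops.
import Mathlib
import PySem

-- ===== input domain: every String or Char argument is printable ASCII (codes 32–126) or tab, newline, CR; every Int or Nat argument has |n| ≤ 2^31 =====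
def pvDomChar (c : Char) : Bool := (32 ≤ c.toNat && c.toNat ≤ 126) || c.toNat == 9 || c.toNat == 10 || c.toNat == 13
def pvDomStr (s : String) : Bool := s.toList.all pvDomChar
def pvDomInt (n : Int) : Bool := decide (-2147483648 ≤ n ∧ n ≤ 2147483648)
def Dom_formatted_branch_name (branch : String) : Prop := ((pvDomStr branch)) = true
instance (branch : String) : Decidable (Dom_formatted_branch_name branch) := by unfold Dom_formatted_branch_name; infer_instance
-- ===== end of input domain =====

-- B replaces A's nested triple loop by one flat loop over the three option lists,
-- collecting the first match from each and joining with '-' (objective: simpler).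
-- Pre_ excludes branches on which the Python A raises RuntimeError.

def pvExperiments : List String := ["control", "real_galaxy", "variable_psf", "multiepoch", "full"]
def pvObservationTypes : List String := ["ground", "space"]
def pvShearTypes : List String := ["constant", "variable"]

-- ===== PORT A =====
-- innermost loop: for stype in shear_types: if stype in branch: return …
def pvGoS (branch exp otype : String) : List String → Option String
  | [] => none
  | st :: rest =>
      if PySem.Str.isIn st branch then some (exp ++ "-" ++ otype ++ "-" ++ st)
      else pvGoS branch exp otype rest

def pvGoO (branch exp : String) : List String → Option String
  | [] => none
  | ot :: rest =>
      if PySem.Str.isIn ot branch then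
        match pvGoS branch exp ot pvShearTypes with
        | some r => some r
        | none => pvGoO branch exp rest
      else pvGoO branch exp rest

def pvGoE (branch : String) : List String → Option String
  | [] => none
  | e :: rest =>
      if PySem.Str.isIn e branch then
        match pvGoO branch e pvObservationTypes with
        | some r => some r
        | none => pvGoE branch rest
      else pvGoE branch rest

def formatted_branch_name (branch : String) : String :=
  match pvGoE branch pvExperiments with
  | some r => r
  | none => ""   -- Python raises RuntimeError here; excluded by Pre_

-- ===== PORT B =====
-- first match in one option list: next((o for o in options if o in branch), None)
def pvFirstIn (branch : String) : List String → Option String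
  | [] => none
  | o :: rest => if PySem.Str.isIn o branch then some o else pvFirstIn branch rest

def formatted_branch_name_alt (branch : String) : String :=
  let step : Option (List String) → List String → Option (List String) :=
    fun parts options =>
      match parts with
      | none => none
      | some ps =>
          match pvFirstIn branch options with
          | none => none       -- Python raises RuntimeError here; excluded by Pre_
          | some m => some (ps ++ [m])
  match [pvExperiments, pvObservationTypes, pvShearTypes].foldl step (some []) with
  | some ps => PySem.Str.join "-" ps
  | none => ""

-- ===== PRECONDITION & SPEC =====
-- Pre_ excludes exactly the branches on which A raises RuntimeError: those containing
-- no experiment name, no observation type, or no shear type as a substring.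
def Pre_formatted_branch_name (branch : String) : Prop :=
  (pvExperiments.any (fun e => PySem.Str.isIn e branch)) = true ∧
  (pvObservationTypes.any (fun o => PySem.Str.isIn o branch)) = true ∧
  (pvShearTypes.any (fun s => PySem.Str.isIn s branch)) = true
instance (branch : String) : Decidable (Pre_formatted_branch_name branch) := by unfold Pre_formatted_branch_name; infer_instance

def pvWitness_formatted_branch_name : String := "control/ground/constant"

def Spec_formatted_branch_name (branch : String) (out : String) : Prop := out = formatted_branch_name_alt branch
instance (branch : String) (out : String) : Decidable (Spec_formatted_branch_name branch out) := by unfold Spec_formatted_branch_name; infer_instance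

-- ===== CLAIM (what is proved, stated in full; the proofs are below) =====
def Claim_equal_formatted_branch_name : Prop := ∀ (branch : String), Dom_formatted_branch_name branch → Pre_formatted_branch_name branch → Spec_formatted_branch_name branch (formatted_branch_name branch)

-- ===== LEMMAS AND PROOFS =====

theorem pv_join3 (a b c : String) :
    PySem.Str.join "-" [a, b, c] = a ++ "-" ++ b ++ "-" ++ c := by
  simp [PySem.Str.join, PySem.Chars.join, List.intercalate]
  ext1
  simp

theorem pvFirstIn_isSome (branch : String) (l : List String)
    (h : l.any (fun x => PySem.Str.isIn x branch) = true) :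
    ∃ x, pvFirstIn branch l = some x := by
  induction l with
  | nil => simp at h
  | cons a t ih =>
    simp only [List.any_cons, Bool.or_eq_true, PySem.Str.isIn_eq] at h
    by_cases ha : PySem.Chars.isIn a.toList branch.toList = true
    · exact ⟨a, by simp [pvFirstIn, ha]⟩
    · obtain ⟨x, hx⟩ := ih (h.resolve_left ha)
      exact ⟨x, by simp [pvFirstIn, ha, hx]⟩

theorem pvGoS_eq (branch e o : String) (l : List String) (s : String)
    (h : pvFirstIn branch l = some s) :
    pvGoS branch e o l = some (e ++ "-" ++ o ++ "-" ++ s) := by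
  induction l with
  | nil => simp [pvFirstIn] at h
  | cons a t ih =>
    by_cases ha : PySem.Chars.isIn a.toList branch.toList = true
    · simp [pvFirstIn, ha] at h
      subst h
      simp [pvGoS, ha]
    · simp [pvFirstIn, ha] at h
      simp [pvGoS, ha, ih h]

theorem pvGoO_eq (branch e : String) (l : List String) (o s : String)
    (ho : pvFirstIn branch l = some o)
    (hs : pvFirstIn branch pvShearTypes = some s) :
    pvGoO branch e l = some (e ++ "-" ++ o ++ "-" ++ s) := by
  induction l with
  | nil => simp [pvFirstIn] at ho
  | cons a t ih =>
    by_cases ha : PySem.Chars.isIn a.toList branch.toList = true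
    · simp [pvFirstIn, ha] at ho
      subst ho
      simp [pvGoO, ha, pvGoS_eq branch e a pvShearTypes s hs]
    · simp [pvFirstIn, ha] at ho
      simp [pvGoO, ha, ih ho]

theorem pvGoE_eq (branch : String) (l : List String) (e o s : String)
    (he : pvFirstIn branch l = some e)
    (ho : pvFirstIn branch pvObservationTypes = some o)
    (hs : pvFirstIn branch pvShearTypes = some s) :
    pvGoE branch l = some (e ++ "-" ++ o ++ "-" ++ s) := by
  induction l with
  | nil => simp [pvFirstIn] at he
  | cons a t ih =>
    by_cases ha : PySem.Chars.isIn a.toList branch.toList = true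
    · simp [pvFirstIn, ha] at he
      subst he
      simp [pvGoE, ha, pvGoO_eq branch a pvObservationTypes o s ho hs]
    · simp [pvFirstIn, ha] at he
      simp [pvGoE, ha, ih he]

-- ===== VERDICT (by name: the statement is the Claim_ definition above) =====
theorem formatted_branch_name_spec : Claim_equal_formatted_branch_name := by
  intro branch _ hpre
  obtain ⟨he, ho, hs⟩ := hpre
  obtain ⟨e, heq⟩ := pvFirstIn_isSome branch pvExperiments he
  obtain ⟨o, hoq⟩ := pvFirstIn_isSome branch pvObservationTypes ho
  obtain ⟨s, hs'⟩ := pvFirstIn_isSome branch pvShearTypes hs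
  unfold Spec_formatted_branch_name formatted_branch_name formatted_branch_name_alt
  rw [pvGoE_eq branch pvExperiments e o s heq hoq hs']
  simp only [List.foldl_cons, List.foldl_nil, heq, hoq, hs']
  simp [pv_join3]
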